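-- pv_equiv track=rewrite | github.com/zacowan/aoc | Solutions/2022/06/solution.py | part2
-- ===== SOURCE A (Python) =====
-- from collections import deque
--
-- def part2(data):
--     """Solve part 2."""
--     characters = deque()
--     result = -1
--     for i, c in enumerate(data):
--         # Add characters to queue
--         characters.append(c)
--         # Check if there are 4 unique characters
--         if i >= 13:
--             if len(set(characters)) == 14:
--                 result = i + 1
--                 break
--             else:
--                 characters.popleft()
--     return result
-- ===== SOURCE B (Python) =====
-- def part2(data):
--     """Solve part 2."""
--     last = {}
--     left = 0
--     for i, c in enumerate(data):
--         j = last.get(c)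
--         if j is not None and j >= left:
--             left = j + 1
--         last[c] = i
--         if i - left + 1 == 14:
--             return i + 1
--     return -1
-- ===== Notes on version B (the rewrite author's own statement) =====
-- stated objective: faster
-- what changed: Replaces the deque plus per-index set-rebuild with a single-pass two-pointer sliding window keeping a last-occurrence dict, so no 14-element set is built at each position.
import Mathlib
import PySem

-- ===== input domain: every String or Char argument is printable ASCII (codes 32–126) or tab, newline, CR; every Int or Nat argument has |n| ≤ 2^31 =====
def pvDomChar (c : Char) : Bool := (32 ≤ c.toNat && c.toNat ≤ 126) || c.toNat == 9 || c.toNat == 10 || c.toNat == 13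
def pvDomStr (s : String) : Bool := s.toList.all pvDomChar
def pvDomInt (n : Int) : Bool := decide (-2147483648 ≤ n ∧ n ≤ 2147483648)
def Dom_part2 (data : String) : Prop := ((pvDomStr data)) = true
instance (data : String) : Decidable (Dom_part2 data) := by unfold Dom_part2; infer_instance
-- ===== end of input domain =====

-- B replaces A's deque + per-index set rebuild by a two-pointer window with a last-occurrence dict (one dict lookup per character).

-- ===== PORT A =====
-- loop of A: deque `chars`, enumerate index i; append, and from i >= 13 on test the 14-window via set size, else popleft
def part2Go (l : List Char) (i : Int) (chars : List Char) : Int :=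
  match l with
  | [] => -1
  | c :: rest =>
    let chars' := chars ++ [c]
    if 13 ≤ i then
      if (PySem.Set.ofList chars').length = 14 then i + 1
      else part2Go rest (i + 1) chars'.tail
    else part2Go rest (i + 1) chars'

def part2 (data : String) : Int := part2Go data.toList 0 []

-- ===== PORT B =====
-- loop of B: `left` window start, `last` maps a char to its most recent index
def part2AltGo (l : List Char) (i : Int) (left : Int) (last : PySem.Dict Char Int) : Int :=
  match l with
  | [] => -1
  | c :: rest =>
    let left' := match last.get? c with
      | some j => if left ≤ j then j + 1 else left
      | none => left
    let last' := last.insert c i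
    if i - left' + 1 = 14 then i + 1
    else part2AltGo rest (i + 1) left' last'

def part2_alt (data : String) : Int := part2AltGo data.toList 0 0 PySem.Dict.empty

-- ===== PRECONDITION & SPEC =====
def Spec_part2 (data : String) (out : Int) : Prop := out = part2_alt data
instance (data : String) (out : Int) : Decidable (Spec_part2 data out) := by unfold Spec_part2; infer_instance

-- ===== CLAIM (what is proved, stated in full; the proofs are below) =====
def Claim_equal_part2 : Prop := ∀ (data : String), Dom_part2 data → Spec_part2 data (part2 data)

-- ===== LEMMAS AND PROOFS =====

-- index of the last occurrence of c in p (none if absent)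
def lastOcc : List Char → Char → Option Nat
  | [], _ => none
  | a :: t, c =>
    match lastOcc t c with
    | some j => some (j + 1)
    | none => if a = c then some 0 else none

theorem lastOcc_append (p : List Char) (a c : Char) :
    lastOcc (p ++ [a]) c = if a = c then some p.length else lastOcc p c := by
  induction p with
  | nil => simp [lastOcc]
  | cons b t ih =>
    simp only [List.cons_append, lastOcc, ih]
    by_cases h : a = c <;> simp [h]

theorem lastOcc_none_iff (p : List Char) (c : Char) : lastOcc p c = none ↔ c ∉ p := by
  induction p with
  | nil => simp [lastOcc]
  | cons b t ih =>
    simp only [lastOcc, List.mem_cons]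
    cases h : lastOcc t c with
    | some j =>
      have hct : c ∈ t := by
        by_contra hc
        rw [ih.mpr hc] at h
        cases h
      simp [hct]
    | none =>
      have hct : c ∉ t := ih.mp h
      by_cases hb : b = c
      · simp [hb]
      · simp [hct]
        constructor <;> exact fun h1 h2 => h1 (Eq.symm h2)

theorem lastOcc_lt (p : List Char) (c : Char) (j : Nat) (h : lastOcc p c = some j) :
    j < p.length := by
  induction p generalizing j with
  | nil => simp [lastOcc] at h
  | cons b t ih =>
    simp only [lastOcc] at h
    cases ht : lastOcc t c with
    | some j' =>
      rw [ht] at h; simp at h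
      have := ih j' ht
      simp [← h]; omega
    | none =>
      rw [ht] at h
      by_cases hb : b = c <;> simp [hb] at h
      simp [← h]

theorem mem_drop_iff_lastOcc (p : List Char) (c : Char) (j : Nat) (h : lastOcc p c = some j) :
    ∀ L : Nat, c ∈ p.drop L ↔ L ≤ j := by
  induction p generalizing j with
  | nil => simp [lastOcc] at h
  | cons b t ih =>
    intro L
    simp only [lastOcc] at h
    cases ht : lastOcc t c with
    | some j' =>
      rw [ht] at h; simp at h
      cases L with
      | zero =>
        simp only [List.drop_zero, List.mem_cons]
        have := (ih j' ht 0).mpr (by omega)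
        simp at this
        constructor
        · intro; omega
        · intro; right; exact this
      | succ L' =>
        simp only [List.drop_succ_cons]
        rw [ih j' ht L']; omega
    | none =>
      rw [ht] at h
      by_cases hb : b = c <;> simp [hb] at h
      have hct : c ∉ t := (lastOcc_none_iff t c).mp ht
      cases L with
      | zero => simp [← h, hb]
      | succ L' =>
        simp only [List.drop_succ_cons]
        constructor
        · intro hm; exact absurd (List.mem_of_mem_drop hm) hct
        · intro; omega

theorem nodup_drop_mono (p : List Char) (m n : Nat) (h : (p.drop m).Nodup) (hmn : m ≤ n) :
    (p.drop n).Nodup := by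
  have : p.drop n = (p.drop m).drop (n - m) := by
    rw [List.drop_drop]; congr 1; omega
  rw [this]
  exact h.sublist (List.drop_sublist _ _)

theorem ofList_sublist (l : List Char) : (PySem.Set.ofList l).Sublist l := by
  induction l using List.reverseRecOn with
  | nil => simp
  | append_singleton xs x ih =>
    rw [PySem.Set.ofList_append_singleton]
    by_cases h : (PySem.Set.ofList xs).contains x = true
    · simp only [PySem.Set.add, h, if_true]
      exact ih.trans (List.sublist_append_left xs [x])
    · simp only [PySem.Set.add, h]
      exact ih.append (List.Sublist.refl [x])

theorem setLen_iff (l : List Char) : (PySem.Set.ofList l).length = l.length ↔ l.Nodup := by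
  constructor
  · intro h
    have := (ofList_sublist l).eq_of_length h
    rw [← this]
    exact PySem.Set.nodup_ofList l
  · intro h
    rw [PySem.Set.ofList_eq_self_of_nodup l h]

-- one step of B's left-pointer update preserves "left is the least start of an all-distinct suffix"
theorem left_step (p : List Char) (a : Char) (lN lN' : Nat)
    (hdef : lN' = match lastOcc p a with | some j => if lN ≤ j then j + 1 else lN | none => lN)
    (H4 : (p.drop lN).Nodup) (H5 : ∀ L, (p.drop L).Nodup → lN ≤ L) :
    lN ≤ lN' ∧ lN' ≤ p.length ∧ ((p ++ [a]).drop lN').Nodup ∧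
      (∀ L, ((p ++ [a]).drop L).Nodup → lN' ≤ L) := by
  have hlen : lN ≤ p.length := H5 p.length (by simp)
  have hdropapp : ∀ L, L ≤ p.length → (p ++ [a]).drop L = p.drop L ++ [a] :=
    fun L hL => List.drop_append_of_le_length hL
  have key : lN' ≤ p.length ∧ lN ≤ lN' ∧ (p.drop lN').Nodup ∧ a ∉ p.drop lN' ∧
      (∀ L, (p.drop L).Nodup → a ∉ p.drop L → lN' ≤ L) := by
    cases hocc : lastOcc p a with
    | none =>
      rw [hocc] at hdef; simp at hdef; subst hdef
      have hna : a ∉ p := (lastOcc_none_iff p a).mp hocc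
      exact ⟨hlen, le_refl _, H4, fun hm => hna (List.mem_of_mem_drop hm), fun L h _ => H5 L h⟩
    | some j =>
      rw [hocc] at hdef; simp only [] at hdef
      have hj := lastOcc_lt p a j hocc
      have hmem := mem_drop_iff_lastOcc p a j hocc
      by_cases hlj : lN ≤ j
      · rw [if_pos hlj] at hdef; subst hdef
        refine ⟨by omega, by omega, nodup_drop_mono p lN (j+1) H4 (by omega), ?_, ?_⟩
        · rw [hmem]; omega
        · intro L _ hna
          rw [hmem] at hna; omega
      · rw [if_neg hlj] at hdef; subst hdef
        refine ⟨hlen, le_refl _, H4, ?_, fun L h _ => H5 L h⟩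
        rw [hmem]; omega
  obtain ⟨k1, k2, k3, k4, k5⟩ := key
  refine ⟨k2, k1, ?_, ?_⟩
  · rw [hdropapp lN' k1]
    simp [List.nodup_append, k3]
    intro y hy hya
    exact k4 (hya ▸ hy)
  · intro L hL
    by_cases hLp : L ≤ p.length
    · rw [hdropapp L hLp] at hL
      simp [List.nodup_append] at hL
      exact k5 L hL.1 (fun hm => hL.2 _ hm rfl)
    · omega

-- the combined invariant: both loops agree from any reachable pair of states
theorem go_eq (rest : List Char) : ∀ (p : List Char) (lN : Nat) (last : PySem.Dict Char Int)
    (chars : List Char),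
    chars = p.drop (p.length - 13) →
    (∀ c, last.get? c = (lastOcc p c).map Int.ofNat) →
    (p.drop lN).Nodup →
    (∀ L, (p.drop L).Nodup → lN ≤ L) →
    p.length ≤ lN + 13 →
    part2Go rest (p.length : Int) chars = part2AltGo rest (p.length : Int) (lN : Int) last := by
  induction rest with
  | nil => intro p lN last chars _ _ _ _ _; simp [part2Go, part2AltGo]
  | cons c rest ih =>
    intro p lN last chars H1 H2 H4 H5 H6
    set lN' : Nat := (match lastOcc p c with | some j => if lN ≤ j then j + 1 else lN | none => lN)
      with hlN'
    obtain ⟨hmono, hle, hnd', hmin'⟩ := left_step p c lN lN' hlN' H4 H5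
    -- B's computed new left equals the cast of lN'
    have hBleft : (match last.get? c with
        | some j => if (lN : Int) ≤ j then j + 1 else (lN : Int)
        | none => (lN : Int)) = (lN' : Int) := by
      rw [H2 c]
      cases hocc : lastOcc p c with
      | none => rw [hocc] at hlN'; simp [hlN']
      | some j =>
        simp only [hocc] at hlN'
        simp only [Option.map_some, Int.ofNat_eq_natCast]
        by_cases h : lN ≤ j
        · rw [if_pos h] at hlN'
          rw [if_pos (show (lN : Int) ≤ (j : Int) by exact_mod_cast h), hlN']
          push_cast; ring
        · rw [if_neg h] at hlN'
          rw [if_neg (show ¬ ((lN : Int) ≤ (j : Int)) by exact_mod_cast h), hlN']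
    -- B's new dict satisfies the last-occurrence invariant for p ++ [c]
    have H2' : ∀ d, (last.insert c (p.length : Int)).get? d =
        (lastOcc (p ++ [c]) d).map Int.ofNat := by
      intro d
      rw [PySem.Dict.get?_insert, lastOcc_append, H2 d]
      by_cases hd : d = c
      · simp [hd]
      · rw [if_neg hd, if_neg (fun h => hd h.symm)]
    have hplen : ((p ++ [c]).length : Int) = (p.length : Int) + 1 := by simp
    simp only [part2Go, part2AltGo, hBleft]
    by_cases hi : 13 ≤ p.length
    · -- window is full: chars ++ [c] is the 14-window ending here
      have hchars_len : chars.length = 13 := by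
        rw [H1, List.length_drop]; omega
      have hwin : chars ++ [c] = (p ++ [c]).drop (p.length - 13) := by
        rw [H1, List.drop_append_of_le_length (by omega)]
      rw [if_pos (show (13 : Int) ≤ (p.length : Int) by exact_mod_cast hi)]
      by_cases hnd : (chars ++ [c]).Nodup
      · -- both fire and return i + 1
        have hset : (PySem.Set.ofList (chars ++ [c])).length = 14 := by
          rw [(setLen_iff _).mpr hnd]; simp [hchars_len]
        rw [if_pos hset]
        have hup : lN' ≤ p.length - 13 := hmin' _ (hwin ▸ hnd)
        rw [if_pos (show (p.length : Int) - (lN' : Int) + 1 = 14 by omega)]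
      · -- neither fires
        have hset : ¬ (PySem.Set.ofList (chars ++ [c])).length = 14 := by
          intro h
          exact hnd ((setLen_iff _).mp (by rw [h]; simp [hchars_len]))
        rw [if_neg hset]
        have hne : lN' ≠ p.length - 13 := by
          intro h
          exact hnd (by rw [hwin, ← h]; exact hnd')
        rw [if_neg (show ¬ ((p.length : Int) - (lN' : Int) + 1 = 14) by omega)]
        have := ih (p ++ [c]) lN' (last.insert c (p.length : Int)) (chars ++ [c]).tail
          (by rw [hwin, List.tail_drop,
                show p.length - 13 + 1 = (p ++ [c]).length - 13 by simp; omega])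
          H2' hnd' hmin' (by simp; omega)
        rw [hplen] at this
        exact this
    · -- window not yet full on A's side; B cannot fire either
      rw [if_neg (show ¬ ((13 : Int) ≤ (p.length : Int)) by exact_mod_cast hi)]
      rw [if_neg (show ¬ ((p.length : Int) - (lN' : Int) + 1 = 14) by omega)]
      have := ih (p ++ [c]) lN' (last.insert c (p.length : Int)) (chars ++ [c])
        (by
          have h1 : p.length - 13 = 0 := by omega
          have h2 : (p ++ [c]).length - 13 = 0 := by simp; omega
          rw [H1, h1, h2]; simp)
        H2' hnd' hmin' (by simp; omega)
      rw [hplen] at this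
      exact this

-- ===== VERDICT (by name: the statement is the Claim_ definition above) =====
theorem part2_spec : Claim_equal_part2 := by
  intro data _
  show part2 data = part2_alt data
  unfold part2 part2_alt
  have := go_eq data.toList [] 0 PySem.Dict.empty []
    (by simp) (by intro c; simp [lastOcc, PySem.Dict.get?_empty]) (by simp) (by intro L _; omega) (by simp)
  simpa using this
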